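-- pv_equiv track=rewrite | github.com/aczzdx/authorship-generation | another_record_linkage.py | get_cluster
-- ===== SOURCE A (Python) =====
-- def get_cluster(tuple_list):
--     cluster = []
--     for i in tuple_list:
--         flag = 0
--         for j in range(len(cluster)):
--             if i[0] in cluster[j]:
--                 if i[1] not in cluster[j]:
--                     cluster[j] = cluster[j] + (i[1],)
--                 flag = 1
--                 break
--             if i[1] in cluster[j]:
--                 if i[0] not in cluster[j]:
--                     cluster[j] = cluster[j] + (i[0],)
--                 flag = 1
--                 break
--         if flag == 0:
--             cluster.append(i)
--     return cluster
-- ===== SOURCE B (Python) =====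
-- def get_cluster(tuple_list):
--     # Index `first`: element -> smallest index of a cluster containing it.
--     # The first cluster containing t[0] or t[1] is min(first[t[0]], first[t[1]]),
--     # so each pair is resolved by dict lookup instead of scanning all clusters.
--     cluster = []
--     first = {}
--     for t in tuple_list:
--         ja = first.get(t[0])
--         jb = first.get(t[1])
--         if ja is None and jb is None:
--             idx = len(cluster)
--             cluster.append(t)
--             for e in t:
--                 if e not in first:
--                     first[e] = idx
--         elif jb is None or (ja is not None and ja <= jb):
--             if jb != ja:
--                 cluster[ja] = cluster[ja] + (t[1],)
--                 first[t[1]] = ja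
--         else:
--             cluster[jb] = cluster[jb] + (t[0],)
--             first[t[0]] = jb
--     return cluster
-- ===== Notes on version B (the rewrite author's own statement) =====
-- stated objective: alternative
-- what changed: A scans the whole cluster list for each pair, membership-testing every cluster; B maintains a dict mapping each element to the smallest index of a cluster containing it, so each pair is resolved with two dict lookups and an incremental index update instead of a linear scan over clusters.
-- outside the precondition, e.g. on get_cluster([(5,)]): A returns [(5,)], B raises IndexError
import Mathlib
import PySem

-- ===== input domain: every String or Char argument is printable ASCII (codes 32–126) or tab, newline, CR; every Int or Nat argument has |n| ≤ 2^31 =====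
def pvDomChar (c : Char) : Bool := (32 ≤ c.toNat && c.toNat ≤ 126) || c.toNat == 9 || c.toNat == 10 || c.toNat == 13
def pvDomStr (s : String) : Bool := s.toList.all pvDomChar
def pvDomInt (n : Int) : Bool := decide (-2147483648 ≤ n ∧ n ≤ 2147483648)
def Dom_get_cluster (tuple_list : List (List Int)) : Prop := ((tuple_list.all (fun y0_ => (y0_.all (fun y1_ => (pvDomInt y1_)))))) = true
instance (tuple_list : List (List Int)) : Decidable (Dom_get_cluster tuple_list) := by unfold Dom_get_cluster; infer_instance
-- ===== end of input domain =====

-- B replaces A's per-pair scan over all clusters by a dict mapping each element to the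
-- smallest index of a cluster containing it, resolving each pair by
-- dict lookup instead of A's scan over all clusters (a different algorithm, same result).

-- ===== PORT A =====
-- A's inner `for j in range(len(cluster))` loop with its break/mutation, as structural recursion:
-- returns `some` of the updated cluster list if some cluster matched (flag = 1), else `none`.
def innerA (x0 x1 : Int) : List (List Int) → Option (List (List Int))
  | [] => none
  | c :: rest =>
    if x0 ∈ c then
      some ((if x1 ∈ c then c else c ++ [x1]) :: rest)
    else if x1 ∈ c then
      some ((if x0 ∈ c then c else c ++ [x0]) :: rest)
    else
      match innerA x0 x1 rest with
      | some r => some (c :: r)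
      | none => none

def get_cluster (tuple_list : List (List Int)) : List (List Int) :=
  tuple_list.foldl (fun cluster i =>
    let x0 := (PySem.List.pyGet? i 0).getD 0   -- i[0]; Pre_ guarantees the index is in range
    let x1 := (PySem.List.pyGet? i 1).getD 0   -- i[1]
    match innerA x0 x1 cluster with
    | some cluster' => cluster'
    | none => cluster ++ [i]) []

-- ===== PORT B =====
-- one iteration of Source B's loop: state = (cluster list, dict element -> min cluster index)
def stepB (st : List (List Int) × PySem.Dict Int Int) (t : List Int) :
    List (List Int) × PySem.Dict Int Int :=
  let cl := st.1
  let d := st.2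
  let x0 := (PySem.List.pyGet? t 0).getD 0   -- t[0]
  let x1 := (PySem.List.pyGet? t 1).getD 0   -- t[1]
  match d.get? x0, d.get? x1 with
  | none, none =>
      let idx : Int := (cl.length : Int)
      (cl ++ [t], t.foldl (fun d' e => if (d'.get? e).isSome then d' else d'.insert e idx) d)
  | some ja, none =>
      (cl.modify ja.toNat (fun c => c ++ [x1]), d.insert x1 ja)
  | some ja, some jb =>
      if ja ≤ jb then
        if jb ≠ ja then (cl.modify ja.toNat (fun c => c ++ [x1]), d.insert x1 ja)
        else (cl, d)
      else
        (cl.modify jb.toNat (fun c => c ++ [x0]), d.insert x0 jb)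
  | none, some jb =>
      (cl.modify jb.toNat (fun c => c ++ [x0]), d.insert x0 jb)

def get_cluster_alt (tuple_list : List (List Int)) : List (List Int) :=
  (tuple_list.foldl stepB ([], PySem.Dict.empty)).1

-- ===== PRECONDITION & SPEC =====
-- Pre_ excludes inputs containing an inner tuple of length < 2: Python A raises IndexError
-- whenever such a tuple's missing element is actually indexed (and B always indexes t[0], t[1],
-- so B raises on every such input).
def Pre_get_cluster (tuple_list : List (List Int)) : Prop :=
  ∀ t ∈ tuple_list, 2 ≤ t.length
instance (tuple_list : List (List Int)) : Decidable (Pre_get_cluster tuple_list) := by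
  unfold Pre_get_cluster; infer_instance

def pvWitness_get_cluster : List (List Int) := [[1, 2], [2, 3], [4, 5], [3, 9]]

def Spec_get_cluster (tuple_list : List (List Int)) (out : List (List Int)) : Prop :=
  out = get_cluster_alt tuple_list
instance (tuple_list : List (List Int)) (out : List (List Int)) : Decidable (Spec_get_cluster tuple_list out) := by
  unfold Spec_get_cluster; infer_instance

-- ===== CLAIM (what is proved, stated in full; the proofs are below) =====
def Claim_equal_get_cluster : Prop := ∀ (tuple_list : List (List Int)), Dom_get_cluster tuple_list → Pre_get_cluster tuple_list → Spec_get_cluster tuple_list (get_cluster tuple_list)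

-- ===== LEMMAS AND PROOFS =====

-- first index of a cluster containing x
def fidx (x : Int) (cl : List (List Int)) : Option Nat :=
  cl.findIdx? (fun c => decide (x ∈ c))

-- min on Option Nat with none = +∞
def omin : Option Nat → Option Nat → Option Nat
  | none, b => b
  | a, none => a
  | some m, some n => some (min m n)

-- the invariant tying B's dict to the cluster list
def DInv (cl : List (List Int)) (d : PySem.Dict Int Int) : Prop :=
  ∀ x : Int, d.get? x = (fidx x cl).map Int.ofNat

theorem omin_map_succ (a b : Option Nat) :
    omin (a.map (· + 1)) (b.map (· + 1)) = (omin a b).map (· + 1) := by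
  cases a <;> cases b <;> simp [omin, Nat.succ_min_succ]

-- A's inner loop, characterized by the first cluster containing x0 or x1
theorem innerA_char (x0 x1 : Int) (cl : List (List Int)) :
    innerA x0 x1 cl =
      (omin (fidx x0 cl) (fidx x1 cl)).map (fun j =>
        cl.modify j (fun c =>
          if x0 ∈ c then (if x1 ∈ c then c else c ++ [x1])
          else (if x0 ∈ c then c else c ++ [x0]))) := by
  induction cl with
  | nil => simp [innerA, fidx, omin]
  | cons c rest ih =>
    by_cases h0 : x0 ∈ c
    · simp only [innerA, if_pos h0]
      rw [show fidx x0 (c :: rest) = some 0 from by simp [fidx, List.findIdx?_cons, h0]]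
      rw [show omin (some 0) (fidx x1 (c :: rest)) = some 0 from by
        cases fidx x1 (c :: rest) <;> simp [omin]]
      rw [Option.map_some, List.modify_zero_cons, if_pos h0]
    · by_cases h1 : x1 ∈ c
      · simp only [innerA, if_neg h0, if_pos h1]
        rw [show fidx x0 (c :: rest) = (fidx x0 rest).map (· + 1) from by
              simp [fidx, List.findIdx?_cons, h0],
            show fidx x1 (c :: rest) = some 0 from by simp [fidx, List.findIdx?_cons, h1]]
        rw [show omin ((fidx x0 rest).map (· + 1)) (some 0) = some 0 from by
          cases fidx x0 rest <;> simp [omin]]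
        rw [Option.map_some, List.modify_zero_cons, if_neg h0, if_neg h0]
      · simp only [innerA, if_neg h0, if_neg h1]
        rw [show fidx x0 (c :: rest) = (fidx x0 rest).map (· + 1) from by
              simp [fidx, List.findIdx?_cons, h0],
            show fidx x1 (c :: rest) = (fidx x1 rest).map (· + 1) from by
              simp [fidx, List.findIdx?_cons, h1],
            omin_map_succ, ih]
        cases omin (fidx x0 rest) (fidx x1 rest) <;>
          simp [List.modify_succ_cons]

theorem fidx_none_not_mem {x : Int} {cl : List (List Int)} (h : fidx x cl = none)
    {c : List Int} (hc : c ∈ cl) : x ∉ c := by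
  have := List.findIdx?_eq_none_iff.mp h c hc
  simpa using this

theorem fidx_some_mem {x : Int} {cl : List (List Int)} {j : Nat} (h : fidx x cl = some j) :
    ∃ hj : j < cl.length, x ∈ cl[j] := by
  obtain ⟨hj, hp, -⟩ := List.findIdx?_eq_some_iff_getElem.mp h
  exact ⟨hj, by simpa using hp⟩

theorem fidx_some_not_mem_lt {x : Int} {cl : List (List Int)} {j k : Nat}
    (h : fidx x cl = some j) (hk : k < j) (hkl : k < cl.length) : x ∉ cl[k] := by
  obtain ⟨hj, -, hmin⟩ := List.findIdx?_eq_some_iff_getElem.mp h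
  have := hmin k hk
  simpa using this

-- appending an element to cluster j: how first indices move
theorem fidx_modify_append (e : Int) (cl : List (List Int)) (j : Nat) (hj : j < cl.length)
    (x : Int) :
    fidx x (cl.modify j (fun c => c ++ [e])) =
      if x = e then omin (some j) (fidx x cl) else fidx x cl := by
  induction cl generalizing j with
  | nil => simp at hj
  | cons c rest ih =>
    cases j with
    | zero =>
      simp only [List.modify_zero_cons]
      by_cases hc : x ∈ c
      · have hxce : x ∈ c ++ [e] := by simp [hc]
        rw [show fidx x ((c ++ [e]) :: rest) = some 0 from by
              simp [fidx, List.findIdx?_cons, hxce],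
            show fidx x (c :: rest) = some 0 from by simp [fidx, List.findIdx?_cons, hc]]
        by_cases hx : x = e <;> simp [hx, omin]
      · by_cases hx : x = e
        · subst hx
          have hxce : x ∈ c ++ [x] := by simp
          rw [show fidx x ((c ++ [x]) :: rest) = some 0 from by
                simp [fidx, List.findIdx?_cons, hxce],
              show fidx x (c :: rest) = (fidx x rest).map (· + 1) from by
                simp [fidx, List.findIdx?_cons, hc],
              if_pos rfl]
          cases fidx x rest <;> simp [omin]
        · have hxce : x ∉ c ++ [e] := by simp [hc, hx]
          rw [show fidx x ((c ++ [e]) :: rest) = (fidx x rest).map (· + 1) from by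
                simp [fidx, List.findIdx?_cons, hxce],
              show fidx x (c :: rest) = (fidx x rest).map (· + 1) from by
                simp [fidx, List.findIdx?_cons, hc],
              if_neg hx]
    | succ j' =>
      have hj' : j' < rest.length := by simpa using hj
      simp only [List.modify_succ_cons]
      by_cases hc : x ∈ c
      · rw [show fidx x (c :: rest.modify j' (fun c => c ++ [e])) = some 0 from by
              simp [fidx, List.findIdx?_cons, hc],
            show fidx x (c :: rest) = some 0 from by simp [fidx, List.findIdx?_cons, hc]]
        by_cases hx : x = e <;> simp [hx, omin]
      · rw [show fidx x (c :: rest.modify j' (fun c => c ++ [e]))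
              = (fidx x (rest.modify j' (fun c => c ++ [e]))).map (· + 1) from by
              simp [fidx, List.findIdx?_cons, hc],
            show fidx x (c :: rest) = (fidx x rest).map (· + 1) from by
              simp [fidx, List.findIdx?_cons, hc],
            ih j' hj']
        by_cases hx : x = e
        · rw [if_pos hx, if_pos hx]
          cases fidx x rest <;> simp [omin, Nat.succ_min_succ]
        · rw [if_neg hx, if_neg hx]

-- appending a brand-new cluster at the end
theorem fidx_append_singleton (x : Int) (cl : List (List Int)) (t : List Int) :
    fidx x (cl ++ [t]) =
      match fidx x cl with
      | some j => some j
      | none => if x ∈ t then some cl.length else none := by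
  induction cl with
  | nil => by_cases h : x ∈ t <;> simp [fidx, List.findIdx?_cons, h]
  | cons c rest ih =>
    by_cases hc : x ∈ c
    · simp [fidx, List.findIdx?_cons, hc]
    · simp only [fidx, List.cons_append, List.findIdx?_cons, hc, decide_false,
        Bool.false_eq_true, if_false]
      rw [show ((rest ++ [t]).findIdx? fun c => decide (x ∈ c)) = fidx x (rest ++ [t]) from rfl,
          ih]
      rw [show (List.findIdx? (fun c => decide (x ∈ c)) rest) = fidx x rest from rfl]
      cases hr : fidx x rest with
      | some j => simp
      | none => by_cases h : x ∈ t <;> simp [h]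

-- B's insert-if-absent fold over the elements of a fresh cluster
theorem get?_foldl_insert_absent (t : List Int) (d : PySem.Dict Int Int) (idx : Int) (x : Int) :
    (t.foldl (fun d' e => if (d'.get? e).isSome then d' else d'.insert e idx) d).get? x =
      match d.get? x with
      | some v => some v
      | none => if x ∈ t then some idx else none := by
  induction t generalizing d with
  | nil => cases h : d.get? x <;> simp [h]
  | cons e rest ih =>
    simp only [List.foldl_cons]
    by_cases he : (d.get? e).isSome
    · rw [if_pos he, ih]
      cases h : d.get? x with
      | some v => simp
      | none =>
        have hne : x ≠ e := by
          intro hxe; subst hxe; rw [h] at he; simp at he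
        simp [List.mem_cons, hne]
    · rw [if_neg he, ih]
      by_cases hxe : x = e
      · subst hxe
        have h : d.get? x = none := by
          cases h : d.get? x; · rfl
          · rw [h] at he; simp at he
        simp [h, PySem.Dict.get?_insert]
      · rw [PySem.Dict.get?_insert, if_neg hxe]
        cases h : d.get? x <;> simp [hxe]

-- one loop iteration: same cluster list, invariant maintained
theorem step_eq (cl : List (List Int)) (d : PySem.Dict Int Int) (hInv : DInv cl d)
    (t : List Int) :
    (match innerA ((PySem.List.pyGet? t 0).getD 0) ((PySem.List.pyGet? t 1).getD 0) cl with
      | some cluster' => cluster'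
      | none => cl ++ [t]) = (stepB (cl, d) t).1 ∧ DInv (stepB (cl, d) t).1 (stepB (cl, d) t).2 := by
  set x0 := (PySem.List.pyGet? t 0).getD 0 with hx0
  set x1 := (PySem.List.pyGet? t 1).getD 0 with hx1
  have h0 := hInv x0
  have h1 := hInv x1
  rw [innerA_char]
  cases hf0 : fidx x0 cl with
  | none =>
    cases hf1 : fidx x1 cl with
    | none =>
      -- both new: append t as a fresh cluster
      rw [hf0] at h0; rw [hf1] at h1
      simp only [Option.map_none] at h0 h1
      constructor
      · simp [stepB, ← hx0, ← hx1, h0, h1, hf0, hf1, omin]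
      · simp only [stepB, ← hx0, ← hx1, h0, h1]
        intro x
        rw [get?_foldl_insert_absent, fidx_append_singleton, hInv x]
        cases hr : fidx x cl <;> by_cases hxt : x ∈ t <;> simp [hr, hxt]
    | some j1 =>
      -- only x1 known: extend cluster j1 with x0
      rw [hf0] at h0; rw [hf1] at h1
      simp only [Option.map_none, Option.map_some] at h0 h1
      obtain ⟨hj1, hmem1⟩ := fidx_some_mem hf1
      have hnm0 : x0 ∉ cl[j1] := fidx_none_not_mem hf0 (List.getElem_mem hj1)
      have htoNat : (Int.ofNat j1).toNat = j1 := rfl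
      constructor
      · simp only [stepB, ← hx0, ← hx1, h0, h1, hf0, hf1, omin, Option.map_some, htoNat]
        apply List.ext_getElem
        · simp
        · intro k hk1 hk2
          simp only [List.getElem_modify]
          by_cases hjk : j1 = k
          · subst hjk
            rw [if_pos rfl, if_pos rfl, if_neg hnm0, if_neg hnm0]
          · rw [if_neg hjk, if_neg hjk]
      · simp only [stepB, ← hx0, ← hx1, h0, h1, htoNat]
        intro x
        rw [fidx_modify_append x0 cl j1 hj1]
        by_cases hx : x = x0
        · subst hx
          rw [PySem.Dict.get?_insert, if_pos rfl, if_pos rfl, hf0]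
          simp [omin]
        · rw [PySem.Dict.get?_insert, if_neg hx, if_neg hx, hInv x]
  | some j0 =>
    rw [hf0] at h0
    simp only [Option.map_some] at h0
    obtain ⟨hj0, hmem0⟩ := fidx_some_mem hf0
    have htoNat : (Int.ofNat j0).toNat = j0 := rfl
    cases hf1 : fidx x1 cl with
    | none =>
      -- only x0 known: extend cluster j0 with x1
      rw [hf1] at h1
      simp only [Option.map_none] at h1
      have hnm1 : x1 ∉ cl[j0] := fidx_none_not_mem hf1 (List.getElem_mem hj0)
      constructor
      · simp only [stepB, ← hx0, ← hx1, h0, h1, hf0, hf1, omin, Option.map_some, htoNat]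
        apply List.ext_getElem
        · simp
        · intro k hk1 hk2
          simp only [List.getElem_modify]
          by_cases hjk : j0 = k
          · subst hjk
            rw [if_pos rfl, if_pos rfl, if_pos hmem0, if_neg hnm1]
          · rw [if_neg hjk, if_neg hjk]
      · simp only [stepB, ← hx0, ← hx1, h0, h1, htoNat]
        intro x
        rw [fidx_modify_append x1 cl j0 hj0]
        by_cases hx : x = x1
        · subst hx
          rw [PySem.Dict.get?_insert, if_pos rfl, if_pos rfl, hf1]
          simp [omin]
        · rw [PySem.Dict.get?_insert, if_neg hx, if_neg hx, hInv x]
    | some j1 =>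
      rw [hf1] at h1
      simp only [Option.map_some] at h1
      obtain ⟨hj1, hmem1⟩ := fidx_some_mem hf1
      have htoNat1 : (Int.ofNat j1).toNat = j1 := rfl
      by_cases hle : j0 ≤ j1
      · by_cases heq : j1 = j0
        · -- same cluster: nothing changes
          subst heq
          have hji : ¬ ((Int.ofNat j1) ≤ (Int.ofNat j1) ∧ (Int.ofNat j1) ≠ (Int.ofNat j1)) := by
            simp
          constructor
          · simp only [stepB, ← hx0, ← hx1, h0, h1, hf0, hf1, omin, Nat.min_self,
              Option.map_some, le_refl, if_pos, ne_eq, not_true_eq_false, if_false,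
              if_true]
            apply List.ext_getElem
            · simp
            · intro k hk1 hk2
              simp only [List.getElem_modify]
              by_cases hjk : j1 = k
              · subst hjk
                rw [if_pos rfl, if_pos hmem0, if_pos hmem1]
              · rw [if_neg hjk]
          · simp only [stepB, ← hx0, ← hx1, h0, h1, le_refl, if_pos, ne_eq,
              not_true_eq_false, if_false]
            exact hInv
        · -- j0 < j1: extend cluster j0 with x1
          have hlt : j0 < j1 := lt_of_le_of_ne hle (Ne.symm heq)
          have hnm1 : x1 ∉ cl[j0] := fidx_some_not_mem_lt hf1 hlt hj0
          have hile : (Int.ofNat j0) ≤ (Int.ofNat j1) := Int.ofNat_le.mpr hle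
          have hine : (Int.ofNat j1) ≠ (Int.ofNat j0) := by
            simp [Int.ofNat_inj, heq]
          constructor
          · simp only [stepB, ← hx0, ← hx1, h0, h1, hf0, hf1, omin, Option.map_some,
              htoNat, if_pos hile, if_pos hine, Nat.min_eq_left hle]
            apply List.ext_getElem
            · simp
            · intro k hk1 hk2
              simp only [List.getElem_modify]
              by_cases hjk : j0 = k
              · subst hjk
                rw [if_pos rfl, if_pos rfl, if_pos hmem0, if_neg hnm1]
              · rw [if_neg hjk, if_neg hjk]
          · simp only [stepB, ← hx0, ← hx1, h0, h1, if_pos hile, if_pos hine, htoNat]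
            intro x
            rw [fidx_modify_append x1 cl j0 hj0]
            by_cases hx : x = x1
            · subst hx
              rw [PySem.Dict.get?_insert, if_pos rfl, if_pos rfl, hf1]
              simp [omin, Nat.min_eq_left (le_of_lt hlt)]
            · rw [PySem.Dict.get?_insert, if_neg hx, if_neg hx, hInv x]
      · -- j1 < j0: extend cluster j1 with x0
        have hlt : j1 < j0 := Nat.lt_of_not_le hle
        have hnm0 : x0 ∉ cl[j1] := fidx_some_not_mem_lt hf0 hlt hj1
        have hile : ¬ ((Int.ofNat j0) ≤ (Int.ofNat j1)) := fun h => hle (Int.ofNat_le.mp h)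
        constructor
        · simp only [stepB, ← hx0, ← hx1, h0, h1, hf0, hf1, omin, Option.map_some,
            htoNat1, if_neg hile, Nat.min_eq_right (le_of_lt hlt)]
          apply List.ext_getElem
          · simp
          · intro k hk1 hk2
            simp only [List.getElem_modify]
            by_cases hjk : j1 = k
            · subst hjk
              rw [if_pos rfl, if_pos rfl, if_neg hnm0, if_neg hnm0]
            · rw [if_neg hjk, if_neg hjk]
        · simp only [stepB, ← hx0, ← hx1, h0, h1, if_neg hile, htoNat1]
          intro x
          rw [fidx_modify_append x0 cl j1 hj1]
          by_cases hx : x = x0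
          · subst hx
            rw [PySem.Dict.get?_insert, if_pos rfl, if_pos rfl, hf0]
            simp [omin, Nat.min_eq_left (le_of_lt hlt)]
          · rw [PySem.Dict.get?_insert, if_neg hx, if_neg hx, hInv x]

theorem fold_eq (tl : List (List Int)) (cl : List (List Int)) (d : PySem.Dict Int Int)
    (hInv : DInv cl d) :
    tl.foldl (fun cluster i =>
      let x0 := (PySem.List.pyGet? i 0).getD 0
      let x1 := (PySem.List.pyGet? i 1).getD 0
      match innerA x0 x1 cluster with
      | some cluster' => cluster'
      | none => cluster ++ [i]) cl = (tl.foldl stepB (cl, d)).1 := by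
  induction tl generalizing cl d with
  | nil => rfl
  | cons t rest ih =>
    obtain ⟨heq, hInv'⟩ := step_eq cl d hInv t
    simp only [List.foldl_cons]
    rw [heq]
    have : stepB (cl, d) t = ((stepB (cl, d) t).1, (stepB (cl, d) t).2) := rfl
    rw [this] at hInv' ⊢
    exact ih _ _ hInv'

-- ===== VERDICT (by name: the statement is the Claim_ definition above) =====
theorem get_cluster_spec : Claim_equal_get_cluster := by
  intro tuple_list _ _
  unfold Spec_get_cluster get_cluster get_cluster_alt
  apply fold_eq
  intro x
  simp [fidx, PySem.Dict.get?_empty]
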